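-- pv_equiv track=rewrite | github.com/usma11dia0/training_of_aizu_online_judge | introduction_to_algorithms_and_data_structures/albs1_6_c_quick_sort.py | is_stable
-- ===== SOURCE A (Python) =====
-- def is_stable(A: list, B: list, n: int) -> bool:
--     """
--     配列Aが安定ソートかどうかを判定する。
--
--     Parameters
--     ----------
--     A: list
--      ソート済みのリスト
--     B: list
--      ソート前のリスト
--     n: int
--      リストの要素数
--
--     Returns
--     -------
--     is_stable: bool
--      安定:True
--      不安定:False
--     """
--     A_dict = {}
--     B_dict = {}
--     for i in range(0, n):
--         A_dict.setdefault(A[i][1], []).append(A[i][0])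
--         B_dict.setdefault(B[i][1], []).append(B[i][0])
--     if A_dict == B_dict:
--         is_stable = True
--     else:
--         is_stable = False
--     return is_stable
-- ===== SOURCE B (Python) =====
-- def is_stable(A: list, B: list, n: int) -> bool:
--     m = max(n, 0)
--     Ap, Bp = A[:m], B[:m]
--     keys = list(dict.fromkeys([r[1] for r in Ap + Bp]))
--     return all(
--         [r[0] for r in Ap if r[1] == k] == [r[0] for r in Bp if r[1] == k]
--         for k in keys
--     )
-- ===== Notes on version B (the rewrite author's own statement) =====
-- stated objective: alternative
-- what changed: Replaces the single-pass dict-of-lists grouping and dict comparison by a per-key rescan: dedup the keys occurring in the first n rows of A and B and, for each key, compare the value sequences extracted by filtering the two prefixes.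
import Mathlib
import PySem

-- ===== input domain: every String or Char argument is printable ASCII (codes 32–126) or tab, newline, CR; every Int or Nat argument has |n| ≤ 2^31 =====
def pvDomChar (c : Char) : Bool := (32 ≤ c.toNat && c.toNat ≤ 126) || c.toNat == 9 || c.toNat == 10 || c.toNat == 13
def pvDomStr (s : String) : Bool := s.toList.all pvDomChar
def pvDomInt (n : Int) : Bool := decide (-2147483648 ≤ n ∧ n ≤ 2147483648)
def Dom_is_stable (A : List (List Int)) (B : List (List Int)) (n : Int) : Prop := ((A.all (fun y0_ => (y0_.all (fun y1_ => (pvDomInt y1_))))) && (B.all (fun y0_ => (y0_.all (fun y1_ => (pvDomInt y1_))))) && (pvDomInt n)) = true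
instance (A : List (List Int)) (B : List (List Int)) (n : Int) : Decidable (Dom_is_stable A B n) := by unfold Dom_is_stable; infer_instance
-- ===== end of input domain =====

-- B replaces A's one-pass dict-of-lists grouping by deduped keys plus a per-key rescan of the
-- two prefixes (alternative decomposition, similar cost). Equality is proved on Pre_ below.

-- ===== PORT A =====
-- row lookup A[i][1] / A[i][0]; out-of-range excluded by Pre_, the getD defaults are never used there
def pvKey (r : List Int) : Int := PySem.List.pyGetD r 1 0
def pvVal (r : List Int) : Int := PySem.List.pyGetD r 0 0

-- Python 'A_dict == B_dict' ignores insertion order: keys as a set + get? on both sides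
def pvDictEq (dA dB : PySem.Dict Int (List Int)) : Bool :=
  dA.keys.all (fun k => dA.get? k == dB.get? k) && dB.keys.all (fun k => dB.get? k == dA.get? k)

def is_stable (A : List (List Int)) (B : List (List Int)) (n : Int) : Bool :=
  -- for i in range(0, n): A_dict.setdefault(A[i][1], []).append(A[i][0])  (same for B) ; setdefault+append = modify
  let st := (PySem.List.pyRange 0 n 1).foldl
    (fun (st : PySem.Dict Int (List Int) × PySem.Dict Int (List Int)) i =>
      (st.1.modify (pvKey (PySem.List.pyGetD A i [])) [] (· ++ [pvVal (PySem.List.pyGetD A i [])]),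
       st.2.modify (pvKey (PySem.List.pyGetD B i [])) [] (· ++ [pvVal (PySem.List.pyGetD B i [])])))
    (PySem.Dict.empty, PySem.Dict.empty)
  if pvDictEq st.1 st.2 then true else false

-- ===== PORT B =====
def is_stable_alt (A : List (List Int)) (B : List (List Int)) (n : Int) : Bool :=
  let m := max n 0
  let Ap := PySem.List.slice A none (some m)
  let Bp := PySem.List.slice B none (some m)
  let keys := PySem.List.dedup ((Ap ++ Bp).map pvKey)
  keys.all (fun k =>
    ((Ap.filter (fun r => pvKey r == k)).map pvVal) == ((Bp.filter (fun r => pvKey r == k)).map pvVal))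

-- ===== PRECONDITION & SPEC =====
-- Pre_ excludes exactly the inputs on which A raises IndexError: n > len(A) or n > len(B),
-- or a row among the first n shorter than 2.
def Pre_is_stable (A : List (List Int)) (B : List (List Int)) (n : Int) : Prop :=
  n ≤ (A.length : Int) ∧ n ≤ (B.length : Int) ∧
  (∀ r ∈ A.take n.toNat, 2 ≤ r.length) ∧ (∀ r ∈ B.take n.toNat, 2 ≤ r.length)
instance (A : List (List Int)) (B : List (List Int)) (n : Int) : Decidable (Pre_is_stable A B n) := by unfold Pre_is_stable; infer_instance
def pvWitness_is_stable : List (List Int) × List (List Int) × Int := ([[1, 0], [2, 0]], [[2, 0], [1, 0]], 2)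

def Spec_is_stable (A : List (List Int)) (B : List (List Int)) (n : Int) (out : Bool) : Prop := out = is_stable_alt A B n
instance (A : List (List Int)) (B : List (List Int)) (n : Int) (out : Bool) : Decidable (Spec_is_stable A B n out) := by unfold Spec_is_stable; infer_instance

-- ===== CLAIM (what is proved, stated in full; the proofs are below) =====
def Claim_equal_is_stable : Prop := ∀ (A : List (List Int)) (B : List (List Int)) (n : Int), Dom_is_stable A B n → Pre_is_stable A B n → Spec_is_stable A B n (is_stable A B n)



-- ===== LEMMAS AND PROOFS =====
-- the grouping loop of port A over one list
def pvGroup (l : List (List Int)) : PySem.Dict Int (List Int) :=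
  l.foldl (fun d r => d.modify (pvKey r) [] (· ++ [pvVal r])) PySem.Dict.empty

-- the per-key value sequence of port B
def pvVals (l : List (List Int)) (k : Int) : List Int :=
  (l.filter (fun r => pvKey r == k)).map pvVal

theorem pvGroup_getD (l : List (List Int)) (k : Int) :
    (pvGroup l).getD k [] = pvVals l k := by
  have h : pvGroup l =
      (l.map (fun r => (pvKey r, pvVal r))).foldl
        (fun d p => d.modify p.1 [] (· ++ [p.2])) PySem.Dict.empty := by
    rw [List.foldl_map]; rfl
  rw [h, PySem.Dict.getD_foldl_modify_append]
  simp [pvVals, List.filter_map, Function.comp_def]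

theorem pvGroup_keys (l : List (List Int)) :
    (pvGroup l).keys = PySem.Set.ofList (l.map pvKey) := by
  rw [pvGroup, PySem.Dict.keys_foldl_modify_key l pvKey [] (fun _ r => (· ++ [pvVal r]))]
  simp [PySem.Set.update_nil_left]

theorem pvVals_ne_nil_iff (l : List (List Int)) (k : Int) :
    pvVals l k ≠ [] ↔ k ∈ l.map pvKey := by
  simp only [pvVals, ne_eq, List.map_eq_nil_iff, List.filter_eq_nil_iff]
  push Not
  constructor
  · rintro ⟨r, hr, hk⟩
    exact List.mem_map.2 ⟨r, hr, (beq_iff_eq.mp (by simpa using hk))⟩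
  · rintro h
    obtain ⟨r, hr, hk⟩ := List.mem_map.1 h
    exact ⟨r, hr, by simp [hk]⟩

theorem pvGroup_get? (l : List (List Int)) (k : Int) :
    (pvGroup l).get? k = if pvVals l k = [] then none else some (pvVals l k) := by
  by_cases hk : k ∈ l.map pvKey
  · have hne : pvVals l k ≠ [] := (pvVals_ne_nil_iff l k).2 hk
    have hmem : k ∈ (pvGroup l).keys := by
      rw [pvGroup_keys]; exact (PySem.Set.mem_ofList _ _).2 hk
    have h1 : (pvGroup l).get? k ≠ none := by
      rw [ne_eq, PySem.Dict.get?_eq_none_iff_not_mem_keys]; simp [hmem]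
    obtain ⟨v, hv⟩ := Option.ne_none_iff_exists'.mp h1
    have h2 : (pvGroup l).getD k [] = v := by
      rw [PySem.Dict.getD_eq_get?_getD, hv]; rfl
    rw [hv, if_neg hne, ← pvGroup_getD, h2]
  · have hnil : pvVals l k = [] := by
      by_contra h; exact hk ((pvVals_ne_nil_iff l k).1 h)
    rw [if_pos hnil, PySem.Dict.get?_eq_none_iff_not_mem_keys]
    rw [pvGroup_keys]
    simpa [PySem.Set.mem_ofList] using hk

theorem pvDictEq_iff (a b : List (List Int)) :
    pvDictEq (pvGroup a) (pvGroup b) = true ↔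
      ∀ k : Int, (k ∈ a.map pvKey ∨ k ∈ b.map pvKey) → pvVals a k = pvVals b k := by
  simp only [pvDictEq, Bool.and_eq_true, List.all_eq_true, beq_iff_eq, pvGroup_keys,
    PySem.Set.mem_ofList]
  constructor
  · rintro ⟨hA, hB⟩ k hk
    rcases hk with hk | hk
    · have h := hA k hk
      rw [pvGroup_get?, pvGroup_get?] at h
      have hne : pvVals a k ≠ [] := (pvVals_ne_nil_iff a k).2 hk
      rw [if_neg hne] at h
      split_ifs at h with h2
      exact Option.some_injective _ h
    · have h := hB k hk
      rw [pvGroup_get?, pvGroup_get?] at h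
      have hne : pvVals b k ≠ [] := (pvVals_ne_nil_iff b k).2 hk
      rw [if_neg hne] at h
      split_ifs at h with h2
      exact (Option.some_injective _ h).symm
  · intro h
    constructor
    · intro k hk
      rw [pvGroup_get?, pvGroup_get?, h k (Or.inl hk)]
    · intro k hk
      rw [pvGroup_get?, pvGroup_get?, h k (Or.inr hk)]

theorem pvPairFoldl (l : List Int) (A B : List (List Int))
    (dA dB : PySem.Dict Int (List Int)) :
    l.foldl (fun (st : PySem.Dict Int (List Int) × PySem.Dict Int (List Int)) i =>
        (st.1.modify (pvKey (PySem.List.pyGetD A i [])) [] (· ++ [pvVal (PySem.List.pyGetD A i [])]),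
         st.2.modify (pvKey (PySem.List.pyGetD B i [])) [] (· ++ [pvVal (PySem.List.pyGetD B i [])])))
      (dA, dB)
    = (l.foldl (fun d i => d.modify (pvKey (PySem.List.pyGetD A i [])) [] (· ++ [pvVal (PySem.List.pyGetD A i [])])) dA,
       l.foldl (fun d i => d.modify (pvKey (PySem.List.pyGetD B i [])) [] (· ++ [pvVal (PySem.List.pyGetD B i [])])) dB) := by
  induction l generalizing dA dB with
  | nil => rfl
  | cons x xs ih => simp only [List.foldl_cons, ih]

theorem pvRangeMax (n : Int) : PySem.List.pyRange 0 n 1 = PySem.List.pyRange 0 (max n 0) 1 := by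
  rcases le_or_gt n 0 with h | h
  · rw [PySem.List.pyRange_one_eq_nil h, max_eq_right h, PySem.List.pyRange_one_eq_nil le_rfl]
  · rw [max_eq_left h.le]

-- the loop over range(0, n) indexing into X equals the fold over X.take n.toNat
theorem pvRangeFoldl {α : Type} (X : List (List Int)) (n : Int) (hn : 0 ≤ n)
    (hlen : n ≤ (X.length : Int)) (f : α → List Int → α) (init : α) :
    (PySem.List.pyRange 0 n 1).foldl (fun acc i => f acc (PySem.List.pyGetD X i [])) init
      = (X.take n.toNat).foldl f init := by
  have hlen' : ((X.take n.toNat).length : Int) = n := by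
    simp only [List.length_take]
    omega
  have hcongr : (PySem.List.pyRange 0 n 1).foldl
      (fun acc i => f acc (PySem.List.pyGetD X i [])) init
      = (PySem.List.pyRange 0 n 1).foldl
      (fun acc i => f acc (PySem.List.pyGetD (X.take n.toNat) i [])) init := by
    apply PySem.List.foldl_congr_mem
    intro acc i hi
    have hi' := (PySem.List.mem_pyRange_one).1 hi
    congr 1
    rw [PySem.List.pyGetD_of_nonneg _ _ hi'.1, PySem.List.pyGetD_of_nonneg _ _ hi'.1]
    rw [List.getD_eq_getElem?_getD, List.getD_eq_getElem?_getD]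
    rw [List.getElem?_take, if_pos (by omega)]
  have key := PySem.List.foldl_pyRange_zero_pyGetD' (X.take n.toNat) ([] : List Int) f init
  rw [hlen'] at key
  rw [hcongr, key]

-- ===== VERDICT (by name: the statement is the Claim_ definition above) =====
theorem is_stable_spec : Claim_equal_is_stable := by
  intro A B n _ hpre
  obtain ⟨hA, hB, _, _⟩ := hpre
  have h0 : (0 : Int) ≤ max n 0 := le_max_right _ _
  have hA' : max n 0 ≤ (A.length : Int) := max_le hA (Int.natCast_nonneg _)
  have hB' : max n 0 ≤ (B.length : Int) := max_le hB (Int.natCast_nonneg _)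
  unfold Spec_is_stable is_stable is_stable_alt
  simp only [pvPairFoldl, PySem.List.slice_to A h0, PySem.List.slice_to B h0, pvRangeMax n]
  have kA := pvRangeFoldl A (max n 0) h0 hA' (fun d r => d.modify (pvKey r) [] (· ++ [pvVal r])) PySem.Dict.empty
  have kB := pvRangeFoldl B (max n 0) h0 hB' (fun d r => d.modify (pvKey r) [] (· ++ [pvVal r])) PySem.Dict.empty
  simp only [] at kA kB
  rw [kA, kB]
  set Ap := A.take (max n 0).toNat
  set Bp := B.take (max n 0).toNat
  have hstA : (Ap.foldl (fun d r => d.modify (pvKey r) [] (· ++ [pvVal r])) PySem.Dict.empty) = pvGroup Ap := rfl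
  have hstB : (Bp.foldl (fun d r => d.modify (pvKey r) [] (· ++ [pvVal r])) PySem.Dict.empty) = pvGroup Bp := rfl
  rw [hstA, hstB]
  have hEq := pvDictEq_iff Ap Bp
  by_cases h : pvDictEq (pvGroup Ap) (pvGroup Bp) = true
  · rw [h, if_pos rfl]
    symm
    rw [List.all_eq_true]
    intro k hk
    have hk' : k ∈ Ap.map pvKey ∨ k ∈ Bp.map pvKey := by
      rw [PySem.List.dedup_eq_ofList, PySem.Set.mem_ofList, List.map_append, List.mem_append] at hk
      exact hk
    exact beq_iff_eq.2 (hEq.1 h k hk')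
  · rw [Bool.not_eq_true] at h
    rw [h, if_neg (by simp)]
    symm
    rw [Bool.eq_false_iff, ne_eq, List.all_eq_true]
    intro hall
    apply Bool.eq_false_iff.mp h
    rw [hEq]
    intro k hk
    have hk' : k ∈ PySem.List.dedup ((Ap ++ Bp).map pvKey) := by
      rw [PySem.List.dedup_eq_ofList, PySem.Set.mem_ofList, List.map_append, List.mem_append]
      exact hk
    exact beq_iff_eq.1 (hall k hk')
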